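-- pv_equiv track=rewrite | github.com/meeb/humanencoding | wordlist/wicktionary_to_wordlist.py | is_lowercase_word
-- ===== SOURCE A (Python) =====
-- import string
--
-- VOWELS = ('a', 'e', 'i', 'o', 'u', 'y')
--
-- def is_lowercase_word(word):
--     has_vowel = False
--     for char in word:
--         if char not in string.ascii_lowercase:
--             return False
--         if char in VOWELS:
--             has_vowel = True
--     return has_vowel
-- ===== SOURCE B (Python) =====
-- import string
--
-- VOWELS = ('a', 'e', 'i', 'o', 'u', 'y')
--
-- def is_lowercase_word(word):
--     chars = set(word)
--     return chars <= set(string.ascii_lowercase) and not chars.isdisjoint(VOWELS)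
-- ===== Notes on version B (the rewrite author's own statement) =====
-- stated objective: idiomatic
-- what changed: Replaces the per-character loop with flag and early return by building the deduplicated character set once and testing subset-of-lowercase and non-disjointness-with-vowels as set operations.
import Mathlib
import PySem

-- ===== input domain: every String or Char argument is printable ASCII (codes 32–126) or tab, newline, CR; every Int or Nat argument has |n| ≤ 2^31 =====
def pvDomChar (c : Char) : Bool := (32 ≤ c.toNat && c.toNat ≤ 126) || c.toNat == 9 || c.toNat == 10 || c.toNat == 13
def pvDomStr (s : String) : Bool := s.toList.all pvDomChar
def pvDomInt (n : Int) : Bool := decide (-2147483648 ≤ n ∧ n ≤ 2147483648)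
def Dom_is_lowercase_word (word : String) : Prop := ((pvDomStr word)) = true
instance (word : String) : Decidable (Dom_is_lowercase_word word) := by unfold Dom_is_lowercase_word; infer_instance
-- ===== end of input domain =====

-- B replaces A's per-character loop with early return by subset/disjointness tests on the deduplicated character set (idiomatic, same behaviour).

-- ===== PORT A =====
def pvAsciiLower : List Char := "abcdefghijklmnopqrstuvwxyz".toList
def pvVowels : List Char := ['a', 'e', 'i', 'o', 'u', 'y']

-- A's loop: early-return False on a non-lowercase char, flag has_vowel otherwise
def pvLoopA : List Char → Bool → Bool
  | [], has_vowel => has_vowel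
  | c :: rest, has_vowel =>
    if !(pvAsciiLower.contains c) then false
    else pvLoopA rest (if pvVowels.contains c then true else has_vowel)

def is_lowercase_word (word : String) : Bool := pvLoopA word.toList false

-- ===== PORT B =====
def is_lowercase_word_alt (word : String) : Bool :=
  let chars : PySem.Set Char := PySem.Set.ofList word.toList
  PySem.Set.issubset chars pvAsciiLower && !(PySem.Set.isdisjoint chars pvVowels)

-- ===== PRECONDITION & SPEC =====
def Spec_is_lowercase_word (word : String) (out : Bool) : Prop := out = is_lowercase_word_alt word
instance (word : String) (out : Bool) : Decidable (Spec_is_lowercase_word word out) := by unfold Spec_is_lowercase_word; infer_instance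

-- ===== CLAIM (what is proved, stated in full; the proofs are below) =====
def Claim_equal_is_lowercase_word : Prop := ∀ (word : String), Dom_is_lowercase_word word → Spec_is_lowercase_word word (is_lowercase_word word)

-- ===== LEMMAS AND PROOFS =====

-- A's loop computes: all chars lowercase AND (the incoming flag OR some char is a vowel)
theorem pvLoopA_eq (l : List Char) (hv : Bool) :
    pvLoopA l hv =
      (l.all (pvAsciiLower.contains ·) && (hv || l.any (pvVowels.contains ·))) := by
  induction l generalizing hv with
  | nil => simp [pvLoopA]
  | cons c rest ih =>
    simp only [pvLoopA, ih, List.all_cons, List.any_cons]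
    cases hca : pvAsciiLower.contains c <;> cases hvw : pvVowels.contains c <;>
      cases hv <;> simp

-- ===== VERDICT (by name: the statement is the Claim_ definition above) =====
theorem is_lowercase_word_spec : Claim_equal_is_lowercase_word := by
  intro word _
  show is_lowercase_word word = is_lowercase_word_alt word
  rw [is_lowercase_word, pvLoopA_eq]
  rw [is_lowercase_word_alt]
  apply Bool.eq_iff_iff.mpr
  simp only [Bool.and_eq_true, Bool.or_eq_true, Bool.not_eq_true', Bool.eq_false_iff, ne_eq,
    List.all_eq_true, List.any_eq_true, List.contains_iff_mem, PySem.Set.issubset_iff,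
    PySem.Set.isdisjoint_iff, PySem.Set.mem_ofList]
  push Not
  tauto
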